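-- pv_equiv track=rewrite | github.com/tarasowski/iss-log-file-parser | parser.py | count_unique_visitors
-- ===== SOURCE A (Python) =====
-- from collections import Counter
--
-- def count_unique_visitors(log_entries):
--     """
--     Count unique visitors by user IP address from log entries.
--
--     Parameters:
--         log_entries (list): A list of log entries as strings.
--
--     Returns:
--         dict: A dictionary with user IP addresses as keys and their visit counts as values.
--         int: The total number of unique visitors.
--     """
--     # Counter to store unique user IP counts
--     user_ip_counter = Counter()
--
--     # Process each log entry
--     for entry in log_entries:
--         parts = entry.split()
--         if len(parts) > 8:  # Check if the entry has enough parts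
--             user_ip_address = parts[8]  # User IP is in the 9th position
--             user_ip_counter[user_ip_address] += 1
--
--     # Return counts and total unique visitors
--     unique_visitors = len(user_ip_counter)
--     return dict(user_ip_counter), unique_visitors
-- ===== SOURCE B (Python) =====
-- def count_unique_visitors(log_entries):
--     """
--     Count unique visitors by user IP address from log entries.
--
--     Repeated-partition strategy: extract the IP column, then repeatedly
--     take the first remaining IP, strip every occurrence of it in one
--     filter pass (its count is the length difference), and continue on
--     the shrunken list.  No hash counting, no per-element increments.
--     """
--     ips = [p[8] for p in (e.split() for e in log_entries) if len(p) > 8]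
--     result = {}
--     while ips:
--         ip = ips[0]
--         rest = [x for x in ips if x != ip]
--         result[ip] = len(ips) - len(rest)
--         ips = rest
--     return result, len(result)
-- ===== Notes on version B (the rewrite author's own statement) =====
-- stated objective: alternative
-- what changed: Replaces the single-pass Counter-increment loop by a repeated-partition algorithm: extract the IP column, then repeatedly strip all occurrences of the first remaining IP in one filter pass, taking its count as the length difference, until the list is exhausted.
import Mathlib
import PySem

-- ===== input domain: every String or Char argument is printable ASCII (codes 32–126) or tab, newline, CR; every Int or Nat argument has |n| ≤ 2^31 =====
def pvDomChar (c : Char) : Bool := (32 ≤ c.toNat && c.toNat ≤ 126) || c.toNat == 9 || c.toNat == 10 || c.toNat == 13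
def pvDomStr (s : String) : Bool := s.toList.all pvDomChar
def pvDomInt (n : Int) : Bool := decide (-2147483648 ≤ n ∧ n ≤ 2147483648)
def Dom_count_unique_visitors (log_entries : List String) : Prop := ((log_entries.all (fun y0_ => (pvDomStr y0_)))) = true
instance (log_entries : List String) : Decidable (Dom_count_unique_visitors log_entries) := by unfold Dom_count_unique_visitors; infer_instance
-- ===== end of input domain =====

-- B replaces A's single-pass Counter loop by a repeated-partition algorithm (strip all occurrences of the first remaining IP per round); same return value (alternative decomposition, no speed claim).

-- ===== PORT A =====
-- A: one pass over the entries, incrementing a Counter at parts[8] when the entry has > 8 fields.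
def count_unique_visitors (log_entries : List String) : (List (String × Int)) × Int :=
  let d : PySem.Dict String Int :=
    log_entries.foldl (fun d entry =>
      let parts := PySem.Str.split₀ entry
      if parts.length > 8 then
        d.modify (PySem.List.pyGetD parts 8 "") 0 (· + 1)   -- parts[8]; in range since len(parts) > 8
      else d) PySem.Dict.empty
  (d.items, (d.size : Int))

-- ===== PORT B =====
-- B's while loop: take the first remaining IP, filter out all its occurrences in
-- one pass, record (ip, length difference), continue on the shrunken list.
def pvPartitionRuns : List String → List (String × Int)
  | [] => []
  | ip :: t =>
    let ips := ip :: t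
    let rest := ips.filter (fun x => x != ip)
    (ip, (ips.length : Int) - (rest.length : Int)) :: pvPartitionRuns rest
termination_by l => l.length
decreasing_by
  simpa [List.filter] using Nat.lt_succ_of_le (List.length_filter_le _ t)

-- B: extract the IP column into a flat list, then consume it by repeated partition.
def count_unique_visitors_alt (log_entries : List String) : (List (String × Int)) × Int :=
  let ips : List String :=
    log_entries.filterMap (fun e =>
      let p := PySem.Str.split₀ e
      if p.length > 8 then some (PySem.List.pyGetD p 8 "") else none)
  let result := pvPartitionRuns ips
  (result, (result.length : Int))

-- ===== PRECONDITION & SPEC =====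
def Spec_count_unique_visitors (log_entries : List String) (out : (List (String × Int)) × Int) : Prop := out = count_unique_visitors_alt log_entries
instance (log_entries : List String) (out : (List (String × Int)) × Int) : Decidable (Spec_count_unique_visitors log_entries out) := by unfold Spec_count_unique_visitors; infer_instance

-- ===== CLAIM (what is proved, stated in full; the proofs are below) =====
def Claim_equal_count_unique_visitors : Prop := ∀ (log_entries : List String), Dom_count_unique_visitors log_entries → Spec_count_unique_visitors log_entries (count_unique_visitors log_entries)

-- ===== LEMMAS AND PROOFS =====

-- A's guarded loop over the entries is the Counter of the extracted-IP list.
theorem countA_eq_counter (log_entries : List String) :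
    log_entries.foldl (fun d entry =>
      let parts := PySem.Str.split₀ entry
      if parts.length > 8 then
        (d : PySem.Dict String Int).modify (PySem.List.pyGetD parts 8 "") 0 (· + 1)
      else d) PySem.Dict.empty
    = PySem.Dict.counter (log_entries.filterMap (fun e =>
        let p := PySem.Str.split₀ e
        if p.length > 8 then some (PySem.List.pyGetD p 8 "") else none)) := by
  rw [PySem.Dict.counter_eq_foldl]
  induction log_entries using List.reverseRecOn with
  | nil => rfl
  | append_singleton xs x ih =>
    simp only [List.foldl_append, List.filterMap_append, List.foldl_cons, List.filterMap_cons,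
      List.filterMap_nil, ih]
    by_cases h : (PySem.Str.split₀ x).length > 8 <;> simp [h]

-- ordered dedup (dict.fromkeys / set-of-list order) commutes with filter
theorem ofList_filter (p : String → Bool) (xs : List String) :
    PySem.Set.ofList (xs.filter p) = (PySem.Set.ofList xs).filter p := by
  induction xs with
  | nil => rfl
  | cons x t ih =>
    rw [PySem.Set.ofList_cons]
    by_cases hp : p x = true
    · simp only [List.filter_cons, hp, if_true, PySem.Set.ofList_cons, ih,
        PySem.Set.discard, List.filter_filter]
      congr 1
      exact List.filter_congr (fun y _ => by rw [Bool.and_comm])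
    · have hp' : p x = false := by simpa using hp
      simp only [List.filter_cons, hp', PySem.Set.discard, List.filter_filter,
        Bool.false_eq_true, if_false, ih]
      refine List.filter_congr (fun y _ => ?_)
      by_cases hy : y = x
      · subst hy; simp [hp']
      · simp [hy]

-- the partition loop produces exactly (first-occurrence dedup, count) pairs
theorem pvPartitionRuns_eq (ips : List String) :
    pvPartitionRuns ips
      = (PySem.Set.ofList ips).map (fun k => (k, (ips.count k : Int))) := by
  induction ips using pvPartitionRuns.induct with
  | case1 => simp [pvPartitionRuns]
  | case2 ip t ipsv rest ih =>
    subst ipsv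
    have hrest : rest = t.filter (fun x => x != ip) := by
      simp [rest]
    rw [pvPartitionRuns, PySem.Set.ofList_cons, List.map_cons]
    congr 1
    · -- head pair: length difference = count of ip
      have h1 : (t.filter (fun x => x != ip)).length = List.countP (fun x => x != ip) t :=
        (List.countP_eq_length_filter).symm
      have h2 : t.length = List.countP (fun x => x == ip) t
          + List.countP (fun x => x != ip) t := by
        simpa [bne] using List.length_eq_countP_add_countP (fun x => x == ip) (l := t)
      have h3 : List.count ip (ip :: t) = List.countP (fun x => x == ip) t + 1 := by
        simp [List.count_eq_countP]
      simp only [rest, hrest] at *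
      refine Prod.ext rfl ?_
      simp only [List.length_cons, h1, h3]
      omega
    · -- tail: recurse on the filtered list
      rw [ih, hrest, ofList_filter, PySem.Set.discard]
      refine List.map_congr_left (fun k hk => ?_)
      have hk' : (k != ip) = true := (List.mem_filter.mp hk).2
      have hkne : k ≠ ip := by simpa using hk'
      have : List.count k (t.filter (fun x => x != ip)) = List.count k t :=
        List.count_filter (by simpa using hkne)
      have hipk : ip ≠ k := Ne.symm hkne
      simp [this, hipk]

theorem main_equiv : ∀ (log_entries : List String), Spec_count_unique_visitors log_entries (count_unique_visitors log_entries) := by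
  intro log_entries
  unfold Spec_count_unique_visitors count_unique_visitors count_unique_visitors_alt
  simp only [countA_eq_counter, pvPartitionRuns_eq]
  refine Prod.ext ?_ ?_
  · simpa using PySem.Dict.items_counter (log_entries.filterMap (fun e =>
      let p := PySem.Str.split₀ e
      if p.length > 8 then some (PySem.List.pyGetD p 8 "") else none))
  · simp only [PySem.Dict.size, PySem.Dict.items_counter, List.length_map]

-- ===== VERDICT (by name: the statement is the Claim_ definition above) =====

theorem count_unique_visitors_spec : Claim_equal_count_unique_visitors := fun l _ => main_equiv l
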